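-- pv_equiv track=rewrite | github.com/NPO-197/PokemonTypeChartRandomizer | HexEditGen3.py | TypeChartToList
-- ===== SOURCE A (Python) =====
-- def TypeChartToList(TypeChart):
--     matchups = [0x0A,0x14,0x05,0x00]
--     TypeChartList = []
--     Imunities = []
--     for i in range(len(TypeChart)):
--         for j in range(len(TypeChart[0])):
--             AtkType = i
--             DefType = j
--             Matchup = matchups[TypeChart[i][j]]
--             #Adjust for TYPE_MYSTERY
--             if AtkType>8:
--                 AtkType+=1
--             if DefType>8:
--                 DefType+=1
--             #Put Imunities at the end (after Forsight breakpoint)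
--             if Matchup == 0x00:
--                 Imunities.extend([AtkType,DefType,Matchup])
--                 continue
--             #Ignore Neutral Matchups
--             if Matchup == 0x0A:
--                 continue
--             #Put NotVerry / Super Effective into the list
--             TypeChartList.extend([AtkType,DefType,Matchup])
--
--     TypeChartList.extend([0xFE,0xFE,0x00])#Foresight break point
--     TypeChartList.extend(Imunities)
--     TypeChartList.extend([0xFF,0xFF,0x00])#End of matchups list
--     return(TypeChartList)
-- ===== SOURCE B (Python) =====
-- def TypeChartToList(TypeChart):
--     matchups = [0x0A, 0x14, 0x05, 0x00]
--     width = len(TypeChart[0]) if TypeChart else 0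
--
--     def scan(wanted):
--         for i, row in enumerate(TypeChart):
--             for j, v in enumerate(row[:width]):
--                 m = matchups[v]
--                 if m in wanted:
--                     yield i + (i > 8)
--                     yield j + (j > 8)
--                     yield m
--
--     return [*scan((0x14, 0x05)), 0xFE, 0xFE, 0x00,
--             *scan((0x00,)), 0xFF, 0xFF, 0x00]
-- ===== Notes on version B (the rewrite author's own statement) =====
-- stated objective: alternative
-- what changed: Replaces A's single interleaved index-driven pass maintaining two mutable accumulator lists by two independent structural scans of the chart (enumerate over rows/cells, no index arithmetic into the chart), each a generator that emits its bytes directly; the result is the concatenation of the two scans around the sentinel triples.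
import Mathlib
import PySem

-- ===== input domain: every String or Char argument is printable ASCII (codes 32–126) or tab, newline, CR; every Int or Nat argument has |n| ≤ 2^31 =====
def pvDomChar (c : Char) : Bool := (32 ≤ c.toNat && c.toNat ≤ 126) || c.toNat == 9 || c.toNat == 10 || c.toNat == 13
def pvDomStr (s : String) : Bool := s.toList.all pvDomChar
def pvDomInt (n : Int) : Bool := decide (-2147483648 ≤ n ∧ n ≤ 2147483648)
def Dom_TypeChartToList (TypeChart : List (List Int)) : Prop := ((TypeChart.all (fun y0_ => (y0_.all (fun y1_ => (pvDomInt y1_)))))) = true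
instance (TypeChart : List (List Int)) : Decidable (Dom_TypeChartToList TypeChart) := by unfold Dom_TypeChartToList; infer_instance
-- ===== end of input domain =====

-- B replaces A's single interleaved index-loop with two mutable accumulators by two
-- independent structural scans of the chart (enumerate, no index arithmetic into the chart),
-- each emitting its bytes directly; alternative decomposition, same asymptotic cost.

-- ===== PORT A =====
def TypeChartToList (TypeChart : List (List Int)) : List Int :=
  let matchups : List Int := [0x0A, 0x14, 0x05, 0x00]
  let st := (PySem.List.pyRange 0 (TypeChart.length : Int) 1).foldl (fun st i =>
      (PySem.List.pyRange 0 ((PySem.List.pyGetD TypeChart 0 ([] : List Int)).length : Int) 1).foldl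
        (fun st j =>
          let AtkType := if i > 8 then i + 1 else i
          let DefType := if j > 8 then j + 1 else j
          let Matchup := PySem.List.pyGetD matchups
            (PySem.List.pyGetD (PySem.List.pyGetD TypeChart i ([] : List Int)) j 0) 0
          if Matchup = 0x00 then (st.1, st.2 ++ [AtkType, DefType, Matchup])
          else if Matchup = 0x0A then st
          else (st.1 ++ [AtkType, DefType, Matchup], st.2)) st)
    (([] : List Int), ([] : List Int))
  st.1 ++ [0xFE, 0xFE, 0x00] ++ st.2 ++ [0xFF, 0xFF, 0x00]

-- ===== PORT B =====
-- scan(wanted): a generator over enumerate(TypeChart) / enumerate(row[:width]) yielding the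
-- three bytes of every cell whose matchup byte is in wanted; ported as a flatMap.
def pvScanB (TypeChart : List (List Int)) (width : Int) (wanted : List Int) : List Int :=
  (PySem.List.enumerate TypeChart 0).flatMap (fun p =>
    (PySem.List.enumerate (PySem.List.slice p.2 none (some width)) 0).flatMap (fun q =>
      let m := PySem.List.pyGetD [(0x0A : Int), 0x14, 0x05, 0x00] q.2 0
      if m ∈ wanted then
        [p.1 + (if p.1 > 8 then 1 else 0), q.1 + (if q.1 > 8 then 1 else 0), m]
      else []))

def TypeChartToList_alt (TypeChart : List (List Int)) : List Int :=
  let width : Int := match TypeChart with | [] => 0 | r0 :: _ => (r0.length : Int)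
  pvScanB TypeChart width [0x14, 0x05] ++ [0xFE, 0xFE, 0x00]
    ++ pvScanB TypeChart width [0x00] ++ [0xFF, 0xFF, 0x00]

-- ===== PRECONDITION & SPEC =====
-- Pre_ excludes exactly the inputs on which A raises IndexError: a row shorter than the first
-- row (so TypeChart[i][j] is out of range) or an accessed cell value outside -4..3 (so
-- matchups[v] is out of range even with Python's negative-index wraparound).
def Pre_TypeChartToList (TypeChart : List (List Int)) : Prop :=
  ∀ row ∈ TypeChart,
    (TypeChart.head?.getD []).length ≤ row.length ∧
    ∀ v ∈ row.take (TypeChart.head?.getD []).length, -4 ≤ v ∧ v ≤ 3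
instance (TypeChart : List (List Int)) : Decidable (Pre_TypeChartToList TypeChart) := by
  unfold Pre_TypeChartToList; infer_instance

def pvWitness_TypeChartToList : List (List Int) := [[0, 1], [3, 2]]

def Spec_TypeChartToList (TypeChart : List (List Int)) (out : List Int) : Prop := out = TypeChartToList_alt TypeChart
instance (TypeChart : List (List Int)) (out : List Int) : Decidable (Spec_TypeChartToList TypeChart out) := by unfold Spec_TypeChartToList; infer_instance

-- ===== CLAIM (what is proved, stated in full; the proofs are below) =====
def Claim_equal_TypeChartToList : Prop := ∀ (TypeChart : List (List Int)), Dom_TypeChartToList TypeChart → Pre_TypeChartToList TypeChart → Spec_TypeChartToList TypeChart (TypeChartToList TypeChart)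

-- ===== LEMMAS AND PROOFS =====

def pvTrip (TypeChart : List (List Int)) (i j : Int) : Int × Int × Int :=
  ((if i > 8 then i + 1 else i), (if j > 8 then j + 1 else j),
    PySem.List.pyGetD [(0x0A : Int), 0x14, 0x05, 0x00]
      (PySem.List.pyGetD (PySem.List.pyGetD TypeChart i ([] : List Int)) j 0) 0)

def pvToL (t : Int × Int × Int) : List Int := [t.1, t.2.1, t.2.2]

def pvStep (st : List Int × List Int) (t : Int × Int × Int) : List Int × List Int :=
  if t.2.2 = 0x00 then (st.1, st.2 ++ pvToL t)
  else if t.2.2 = 0x0A then st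
  else (st.1 ++ pvToL t, st.2)

lemma pv_foldl_step (ts : List (Int × Int × Int)) (a b : List Int) :
    ts.foldl pvStep (a, b)
      = (a ++ ((ts.filter (fun t => t.2.2 != 10)).filter (fun t => t.2.2 != 0)).flatMap pvToL,
         b ++ ((ts.filter (fun t => t.2.2 != 10)).filter (fun t => t.2.2 == 0)).flatMap pvToL) := by
  induction ts generalizing a b with
  | nil => simp
  | cons t ts ih =>
    by_cases h0 : t.2.2 = 0
    · simp [pvStep, h0, ih, List.append_assoc]
    · by_cases h10 : t.2.2 = 10
      · simp [pvStep, h10, ih]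
      · simp [pvStep, h0, h10, ih, List.append_assoc]

lemma pv_flatMap_if {α β : Type} (l : List α) (p : α → Prop) [DecidablePred p] (f : α → List β) :
    l.flatMap (fun x => if p x then f x else []) = (l.filter (fun x => decide (p x))).flatMap f := by
  induction l with
  | nil => rfl
  | cons x l ih =>
    rw [List.flatMap_cons, List.filter_cons]
    by_cases h : p x
    · simp only [h, if_pos, List.flatMap_cons, ih, decide_true]
    · simp only [h, if_false, decide_false]
      simp [ih]

lemma pv_m_cases (v : Int) :
    PySem.List.pyGetD [(10 : Int), 20, 5, 0] v 0 = 0 ∨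
    PySem.List.pyGetD [(10 : Int), 20, 5, 0] v 0 = 5 ∨
    PySem.List.pyGetD [(10 : Int), 20, 5, 0] v 0 = 10 ∨
    PySem.List.pyGetD [(10 : Int), 20, 5, 0] v 0 = 20 := by
  rcases h : PySem.List.pyGet? [(10 : Int), 20, 5, 0] v with _ | x
  · left; simp [PySem.List.pyGetD, h]
  · have hm : x ∈ [(10 : Int), 20, 5, 0] := PySem.List.mem_of_pyGet?_eq_some _ h
    have he : PySem.List.pyGetD [(10 : Int), 20, 5, 0] v 0 = x := by
      simp [PySem.List.pyGetD, h]
    rw [he]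
    simp only [List.mem_cons, List.not_mem_nil, or_false] at hm
    tauto

lemma pv_adj (k : Int) : k + (if k > 8 then 1 else 0) = (if k > 8 then k + 1 else k) := by
  split_ifs <;> omega

-- B's scan equals the wanted-filtered cell list, given that every row has at least width cells.
lemma pv_scan (TC : List (List Int)) (wNat : Nat)
    (hPre : ∀ row ∈ TC, wNat ≤ row.length) (wanted : List Int) :
    pvScanB TC (wNat : Int) wanted
      = (((PySem.List.pyRange 0 (TC.length : Int) 1).flatMap (fun i =>
            (PySem.List.pyRange 0 (wNat : Int) 1).map (pvTrip TC i))).filter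
          (fun t => decide (t.2.2 ∈ wanted))).flatMap pvToL := by
  unfold pvScanB
  rw [PySem.List.enumerate_eq_map_pyRange TC ([] : List Int), List.flatMap_map]
  simp only [PySem.List.len_eq, PySem.List.slice_to_natCast]
  rw [List.filter_flatMap, List.flatMap_assoc]
  apply List.flatMap_congr
  intro i hi
  rw [PySem.List.mem_pyRange_one] at hi
  have hrow : PySem.List.pyGetD TC i ([] : List Int) ∈ TC := by
    apply PySem.List.pyGetD_mem
    simp only [PySem.Raise.InRange]
    omega
  set row := PySem.List.pyGetD TC i ([] : List Int) with hrowdef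
  have hlen : wNat ≤ row.length := hPre row hrow
  -- 'simp only [pysem]' above already turned the slice row[:width] into List.take
  rw [PySem.List.enumerate_eq_map_pyRange (List.take wNat row) (0 : Int), List.flatMap_map]
  simp only [PySem.List.len_eq]
  have htk : (List.take wNat row).length = wNat := by simp [hlen]
  rw [htk]
  -- the right-hand side, as a flatMap of an if over the same range
  rw [List.filter_map, List.flatMap_map]
  rw [show ((fun (t : Int × Int × Int) => decide (t.2.2 ∈ wanted)) ∘ pvTrip TC i)
        = fun j => decide ((pvTrip TC i j).2.2 ∈ wanted) from rfl]
  rw [← pv_flatMap_if (PySem.List.pyRange 0 (wNat : Int) 1)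
        (fun j => (pvTrip TC i j).2.2 ∈ wanted) (fun j => pvToL (pvTrip TC i j))]
  apply List.flatMap_congr
  intro j hj
  rw [PySem.List.mem_pyRange_one] at hj
  have hv : PySem.List.pyGetD (List.take wNat row) j 0 = PySem.List.pyGetD row j 0 := by
    rw [PySem.List.pyGetD_eq_getElem _ _ hj.1 (by rw [htk]; exact_mod_cast hj.2),
        PySem.List.pyGetD_eq_getElem _ _ hj.1 (by omega)]
    exact List.getElem_take
  simp only [pvTrip, pvToL, hv, pv_adj]
  rw [← hrowdef]

-- the widths the two ports read agree
lemma pv_width (TC : List (List Int)) :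
    (match TC with | [] => (0 : Int) | r0 :: _ => ((r0.length : Int)))
      = ((PySem.List.pyGetD TC 0 ([] : List Int)).length : Int) := by
  cases TC <;> simp [PySem.List.pyGetD_zero_cons, PySem.List.pyGetD, PySem.List.pyGet?, PySem.List.pyIdx?]

lemma pv_head (TC : List (List Int)) :
    (TC.head?.getD []).length = (PySem.List.pyGetD TC 0 ([] : List Int)).length := by
  cases TC <;> simp [PySem.List.pyGetD_zero_cons, PySem.List.pyGetD, PySem.List.pyGet?, PySem.List.pyIdx?]

-- the whole equality, on the zeta-expanded bodies of the two ports (width already aligned)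
lemma pv_main (TC : List (List Int))
    (hPre : ∀ row ∈ TC, (PySem.List.pyGetD TC 0 ([] : List Int)).length ≤ row.length) :
    (let st := (PySem.List.pyRange 0 (TC.length : Int) 1).foldl (fun st i =>
        (PySem.List.pyRange 0 ((PySem.List.pyGetD TC 0 ([] : List Int)).length : Int) 1).foldl
          (fun st j => pvStep st (pvTrip TC i j)) st) (([] : List Int), ([] : List Int));
      st.1 ++ [0xFE, 0xFE, 0x00] ++ st.2 ++ [0xFF, 0xFF, 0x00])
    = pvScanB TC ((PySem.List.pyGetD TC 0 ([] : List Int)).length : Int) [0x14, 0x05]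
        ++ [0xFE, 0xFE, 0x00]
        ++ pvScanB TC ((PySem.List.pyGetD TC 0 ([] : List Int)).length : Int) [0x00]
        ++ [0xFF, 0xFF, 0x00] := by
  show _ ++ _ ++ _ ++ _ = _ ++ _ ++ _ ++ _
  rw [pv_scan TC _ hPre, pv_scan TC _ hPre]
  have hfold : (PySem.List.pyRange 0 (TC.length : Int) 1).foldl (fun st i =>
        (PySem.List.pyRange 0 ((PySem.List.pyGetD TC 0 ([] : List Int)).length : Int) 1).foldl
          (fun st j => pvStep st (pvTrip TC i j)) st) (([] : List Int), ([] : List Int))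
      = ((PySem.List.pyRange 0 (TC.length : Int) 1).flatMap (fun i =>
          (PySem.List.pyRange 0 ((PySem.List.pyGetD TC 0 ([] : List Int)).length : Int) 1).map
            (pvTrip TC i))).foldl pvStep ([], []) := by
    rw [List.flatMap_def, List.foldl_flatten, List.foldl_map]
    simp only [List.foldl_map]
  rw [hfold, pv_foldl_step]
  simp only [List.filter_filter, List.nil_append]
  have hmem : ∀ t ∈ (PySem.List.pyRange 0 (TC.length : Int) 1).flatMap (fun i =>
      (PySem.List.pyRange 0 ((PySem.List.pyGetD TC 0 ([] : List Int)).length : Int) 1).map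
        (pvTrip TC i)),
      t.2.2 = 0 ∨ t.2.2 = 5 ∨ t.2.2 = 10 ∨ t.2.2 = 20 := by
    intro t ht
    simp only [List.mem_flatMap, List.mem_map] at ht
    obtain ⟨i, -, j, -, rfl⟩ := ht
    exact pv_m_cases _
  have hE := List.filter_congr (l := (PySem.List.pyRange 0 (TC.length : Int) 1).flatMap (fun i =>
      (PySem.List.pyRange 0 ((PySem.List.pyGetD TC 0 ([] : List Int)).length : Int) 1).map
        (pvTrip TC i)))
    (p := fun a => a.2.2 != 0 && a.2.2 != 10)
    (q := fun t => decide (t.2.2 ∈ ([20, 5] : List Int)))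
    (fun t ht => by rcases hmem t ht with h | h | h | h <;> simp [h])
  have hI := List.filter_congr (l := (PySem.List.pyRange 0 (TC.length : Int) 1).flatMap (fun i =>
      (PySem.List.pyRange 0 ((PySem.List.pyGetD TC 0 ([] : List Int)).length : Int) 1).map
        (pvTrip TC i)))
    (p := fun a => a.2.2 == 0 && a.2.2 != 10)
    (q := fun t => decide (t.2.2 ∈ ([0] : List Int)))
    (fun t ht => by rcases hmem t ht with h | h | h | h <;> simp [h])
  rw [hE, hI]

-- ===== VERDICT (by name: the statement is the Claim_ definition above) =====
theorem TypeChartToList_spec : Claim_equal_TypeChartToList := by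
  intro TC hd hp
  show TypeChartToList TC = TypeChartToList_alt TC
  have hPre : ∀ row ∈ TC, (PySem.List.pyGetD TC 0 ([] : List Int)).length ≤ row.length := by
    intro row hr
    have := (hp row hr).1
    rw [pv_head TC] at this
    omega
  unfold TypeChartToList TypeChartToList_alt
  rw [pv_width TC]
  exact pv_main TC hPre
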